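-- pv_equiv track=rewrite | github.com/matwerner/resume_parser | resume_parser/segmenter/evaluation.py | _get_segment_lengths
-- ===== SOURCE A (Python) =====
-- from typing import List, Dict, Any, Optional
--
-- def _get_segment_lengths(seq: List[bool]) -> List[int]:
--     segment_lengths = []
--
--     length = 0
--     for is_boundary in seq:
--         if is_boundary:
--             segment_lengths.append(length)
--             length = 0
--         length += 1
--     if length > 0:
--         segment_lengths.append(length)
--
--     assert sum(segment_lengths) == len(seq)
--     return segment_lengths
-- ===== SOURCE B (Python) =====
-- def _get_segment_lengths(seq):
--     if not seq:
--         return []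
--     idx = [i for i, b in enumerate(seq) if b]
--     res = []
--     prev = 0
--     for i in idx:
--         res.append(i - prev)
--         prev = i
--     res.append(len(seq) - prev)
--     return res
-- ===== Notes on version B (the rewrite author's own statement) =====
-- stated objective: alternative
-- what changed: B first collects the boundary positions as an index list and then emits segment lengths as successive gaps between those positions (plus the tail gap), instead of A's single counter that is flushed and reset while scanning.
import Mathlib
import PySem

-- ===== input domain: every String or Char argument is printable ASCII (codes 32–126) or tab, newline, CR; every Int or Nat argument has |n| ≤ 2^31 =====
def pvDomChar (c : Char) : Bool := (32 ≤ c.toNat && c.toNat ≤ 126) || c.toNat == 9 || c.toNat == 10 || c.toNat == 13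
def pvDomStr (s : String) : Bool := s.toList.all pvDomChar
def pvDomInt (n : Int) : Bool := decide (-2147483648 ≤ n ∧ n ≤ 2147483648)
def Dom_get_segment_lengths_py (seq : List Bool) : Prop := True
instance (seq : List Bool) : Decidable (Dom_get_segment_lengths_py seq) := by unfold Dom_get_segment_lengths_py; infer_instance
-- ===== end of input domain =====

-- B rewrites A's scan-with-resetting-counter as boundary-index collection followed by gap differences; objective: alternative decomposition.

-- ===== PORT A =====
-- A's loop: counter reset at each boundary; the trailing assert is provably always
-- true (the lengths sum to len(seq)), so it never raises and is not ported.
def get_segment_lengths_py (seq : List Bool) : List Int :=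
  let p : List Int × Int := seq.foldl
    (fun (st : List Int × Int) (is_boundary : Bool) =>
      let st := if is_boundary then (st.1 ++ [st.2], 0) else st
      (st.1, st.2 + 1)) ([], 0)
  if p.2 > 0 then p.1 ++ [p.2] else p.1

-- ===== PORT B =====
def get_segment_lengths_py_alt (seq : List Bool) : List Int :=
  if seq = [] then []
  else
    let idx : List Int := ((PySem.List.enumerate seq).filter (fun p => p.2)).map (fun p => p.1)
    let p : List Int × Int := idx.foldl
      (fun (st : List Int × Int) (i : Int) => (st.1 ++ [i - st.2], i)) ([], 0)
    p.1 ++ [(seq.length : Int) - p.2]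

-- ===== PRECONDITION & SPEC =====
def Spec_get_segment_lengths_py (seq : List Bool) (out : List Int) : Prop := out = get_segment_lengths_py_alt seq
instance (seq : List Bool) (out : List Int) : Decidable (Spec_get_segment_lengths_py seq out) := by unfold Spec_get_segment_lengths_py; infer_instance

-- ===== CLAIM (what is proved, stated in full; the proofs are below) =====
def Claim_equal_get_segment_lengths_py : Prop := ∀ (seq : List Bool), Dom_get_segment_lengths_py seq → Spec_get_segment_lengths_py seq (get_segment_lengths_py seq)

-- ===== LEMMAS AND PROOFS =====

-- common recursive characterisation: remaining segment lengths given the running counter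
def segRec : List Bool → Int → List Int
  | [], len => if len > 0 then [len] else []
  | b :: rest, len => if b then len :: segRec rest 1 else segRec rest (len + 1)

-- A's fold, started from (acc, len), equals acc ++ segRec seq len
theorem Aside (seq : List Bool) : ∀ (acc : List Int) (len : Int),
    (let p := seq.foldl
      (fun (st : List Int × Int) (is_boundary : Bool) =>
        let st := if is_boundary then (st.1 ++ [st.2], 0) else st
        (st.1, st.2 + 1)) (acc, len)
     if p.2 > 0 then p.1 ++ [p.2] else p.1) = acc ++ segRec seq len := by
  induction seq with
  | nil =>
    intro acc len
    simp only [List.foldl, segRec]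
    split_ifs <;> simp
  | cons b rest ih =>
    intro acc len
    cases b with
    | true => simpa [List.foldl, segRec] using ih (acc ++ [len]) 1
    | false => simpa [List.foldl, segRec] using ih acc (len + 1)

-- boundary indices of seq with positions starting at k
def idxFrom : Nat → List Bool → List Int
  | _, [] => []
  | k, b :: rest => if b then (k : Int) :: idxFrom (k + 1) rest else idxFrom (k + 1) rest

theorem idxFrom_eq_enum (seq : List Bool) : ∀ (k : Nat),
    ((PySem.List.enumerate seq (k : Int)).filter (fun p => p.2)).map (fun p => p.1)
      = idxFrom k seq := by
  induction seq with
  | nil => intro k; simp [idxFrom]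
  | cons b rest ih =>
    intro k
    cases b <;> simp [PySem.List.enumerate_cons, idxFrom, ← ih (k + 1)]

-- B's gap fold over idxFrom k seq, started from (acc, prev), equals acc ++ segRec seq (k - prev)
theorem Bside (seq : List Bool) : ∀ (k : Nat) (prev : Int) (acc : List Int),
    prev ≤ (k : Int) → (prev < (k : Int) ∨ seq ≠ []) →
    (let p := (idxFrom k seq).foldl
        (fun (st : List Int × Int) (i : Int) => (st.1 ++ [i - st.2], i)) (acc, prev)
     p.1 ++ [((k : Int) + (seq.length : Int)) - p.2]) = acc ++ segRec seq ((k : Int) - prev) := by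
  induction seq with
  | nil =>
    intro k prev acc hle hpos
    have h : prev < (k : Int) := by
      rcases hpos with h | h
      · exact h
      · exact absurd rfl h
    simp only [idxFrom, List.foldl, segRec]
    rw [if_pos (by omega)]
    simp
  | cons b rest ih =>
    intro k prev acc hle _
    cases b with
    | true =>
      have h1 : ((k + 1 : Nat) : Int) - (k : Int) = 1 := by push_cast; ring
      have h2 : ((k : Int)) + ((rest.length + 1 : Nat) : Int) = ((k + 1 : Nat) : Int) + (rest.length : Int) := by push_cast; ring
      have H := ih (k + 1) (k : Int) (acc ++ [(k : Int) - prev]) (by push_cast; omega)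
        (Or.inl (by push_cast; omega))
      rw [h1] at H
      simp only [idxFrom, segRec, List.foldl, List.length_cons, reduceIte] at H ⊢
      rw [h2, H]
      simp
    | false =>
      have h2 : ((k : Int)) + ((rest.length + 1 : Nat) : Int) = ((k + 1 : Nat) : Int) + (rest.length : Int) := by push_cast; ring
      have h3 : ((k + 1 : Nat) : Int) - prev = ((k : Int) - prev) + 1 := by push_cast; ring
      have H := ih (k + 1) prev acc (by push_cast; omega) (Or.inl (by push_cast; omega))
      simp only [idxFrom, segRec, List.length_cons] at H ⊢
      rw [h2, ← h3]
      exact H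

theorem alt_eq_segRec (seq : List Bool) : get_segment_lengths_py_alt seq = segRec seq 0 := by
  cases seq with
  | nil => simp [get_segment_lengths_py_alt, segRec]
  | cons b rest =>
    have hb := Bside (b :: rest) 0 0 [] (by norm_num) (Or.inr (by simp))
    simp only [get_segment_lengths_py_alt, if_neg (List.cons_ne_nil b rest)]
    have he := idxFrom_eq_enum (b :: rest) 0
    simp only [Nat.cast_zero] at he hb
    rw [he]
    simpa using hb

-- ===== VERDICT (by name: the statement is the Claim_ definition above) =====
theorem get_segment_lengths_py_spec : Claim_equal_get_segment_lengths_py := by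
  intro seq _
  show get_segment_lengths_py seq = get_segment_lengths_py_alt seq
  rw [alt_eq_segRec]
  simpa [get_segment_lengths_py] using Aside seq [] 0
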